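-- pv_equiv track=rewrite | github.com/kacpersienkiewicz/Generate-and-Fix-ChessBoard | GenerateAndFixChessBoardFunctions.py | validateErrorList
-- ===== SOURCE A (Python) =====
-- def validateErrorList(errorList):
--     # this will basically try to see if fixChessBoard successfully fixed errors by checking the errorList to see if they
--     # are still in error
--
--     for error, pairs in errorList.items():
--         for i, j in list(pairs.items()):
--             findDiv = i.find('|')
--             piecePairs = {}
--             piecePairs.update({i: j})
--
--             if error == 'length':
--                 if len(i) == 3:
--                     pairs.pop(i)
--
--             elif error == 'invalidInt':
--                 try:
--                     if int(i[findDiv + 1:]) in range(1, 9):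
--                         pairs.pop(i)
--                 except ValueError:
--                     continue
--
--             elif error == 'invalidLetter':
--                 if i[:findDiv] in ['a', 'b', 'c', 'd', 'e', 'f', 'g', 'h']:
--                     pairs.pop(i)
--
--             elif error == 'pieceColor':
--                 if j[0] in ['b', 'w']:
--                     pairs.pop(i)
--
--             elif error == 'pieceName':
--                 if j[1:] in ['pawn', 'knight', 'bishop', 'rook', 'queen', 'king']:
--                     pairs.pop(i)
--
--     return errorList
-- ===== SOURCE B (Python) =====
-- def validateErrorList(errorList):
--     # Table-driven re-implementation: an ordered table of (error kind, "entry is fixed now?"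
--     # predicate); a linear lookup picks the predicate and each inner dict is rebuilt by
--     # filtering.  NOTE: A mutates the inner dicts in place (pop); B rebinds
--     # errorList[error] to a new dict -- the RETURN value is identical.
--     def int_ok(i):
--         try:
--             return int(i[i.find('|') + 1:]) in range(1, 9)
--         except ValueError:
--             return False
--
--     table = [
--         ('length', lambda i, j: len(i) == 3),
--         ('invalidInt', lambda i, j: int_ok(i)),
--         ('invalidLetter', lambda i, j: i[:i.find('|')] in ['a', 'b', 'c', 'd', 'e', 'f', 'g', 'h']),
--         ('pieceColor', lambda i, j: j[:1] in ['b', 'w']),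
--         ('pieceName', lambda i, j: j[1:] in ['pawn', 'knight', 'bishop', 'rook', 'queen', 'king']),
--     ]
--
--     for error, pairs in errorList.items():
--         pred = next((p for name, p in table if name == error), lambda i, j: False)
--         errorList[error] = {i: j for i, j in pairs.items() if not pred(i, j)}
--     return errorList
-- ===== Notes on version B (the rewrite author's own statement) =====
-- stated objective: idiomatic
-- what changed: Replaces A's if/elif chain with in-place pops during iteration by an ordered table of per-error 'entry is fixed' predicates, a linear table lookup per error kind, and a single driver loop that rebuilds each inner dict with a filtering comprehension (return value only; A mutates the inner dicts, B rebinds them).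
import Mathlib
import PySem

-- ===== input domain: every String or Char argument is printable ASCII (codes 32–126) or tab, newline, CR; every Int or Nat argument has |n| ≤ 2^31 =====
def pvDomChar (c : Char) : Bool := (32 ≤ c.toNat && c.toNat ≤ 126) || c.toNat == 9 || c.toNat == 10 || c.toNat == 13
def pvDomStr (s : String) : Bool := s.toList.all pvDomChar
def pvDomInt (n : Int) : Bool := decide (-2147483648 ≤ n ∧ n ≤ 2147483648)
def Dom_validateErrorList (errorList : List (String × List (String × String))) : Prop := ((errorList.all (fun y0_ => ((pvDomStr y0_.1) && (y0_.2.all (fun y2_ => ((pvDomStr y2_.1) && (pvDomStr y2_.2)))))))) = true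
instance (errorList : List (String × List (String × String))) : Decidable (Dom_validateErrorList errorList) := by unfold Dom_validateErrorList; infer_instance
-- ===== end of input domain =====

-- B replaces A's if/elif chain with in-place pops by an ordered table of per-error-kind
-- "entry is fixed" predicates (linear lookup) and a filtering rebuild of each inner dict;
-- equal RETURN value (A mutates the inner dicts in place, B rebinds them — equivalence here
-- is about the return value only).


-- ===== PORT A =====
-- One iteration of A's inner loop: the if/elif chain, 'pairs.pop(i)' = Dict.erase.
-- (A's local 'piecePairs' dict is built and never read — dead code, not ported.)
def vStep (error : String) (st : PySem.Dict String String) (ij : String × String) :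
    PySem.Dict String String :=
  let i := ij.1
  let j := ij.2
  let findDiv := PySem.Str.find i "|"
  if error == "length" then
    if PySem.Str.len i == 3 then st.erase i else st
  else if error == "invalidInt" then
    -- try: int(i[findDiv+1:]) … except ValueError: continue
    match PySem.Int.ofStr? (PySem.Str.slice i (some (findDiv + 1)) none) with
    | some n => if (PySem.List.pyRange 1 9 1).contains n then st.erase i else st
    | none => st
  else if error == "invalidLetter" then
    if ["a", "b", "c", "d", "e", "f", "g", "h"].contains
        (PySem.Str.slice i none (some findDiv)) then st.erase i else st
  else if error == "pieceColor" then
    -- j[0]: a 1-char string in Python, a Char here (exact: membership in ['b','w'] is char equality)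
    match PySem.Str.pyGet? j 0 with
    | some c => if (['b', 'w'] : List Char).contains c then st.erase i else st
    | none => st  -- Python raises IndexError here; excluded by Pre_
  else if error == "pieceName" then
    if ["pawn", "knight", "bishop", "rook", "queen", "king"].contains
        (PySem.Str.slice j (some 1) none) then st.erase i else st
  else st

def validateErrorList (errorList : List (String × List (String × String))) :
    List (String × List (String × String)) :=
  -- for error, pairs in errorList.items(): for i, j in list(pairs.items()): …
  errorList.map (fun ep => (ep.1, (ep.2.foldl (vStep ep.1) (PySem.Dict.mk ep.2)).items))

-- ===== PORT B =====
-- Source B's ordered table of (error kind, "entry is fixed now?" predicate).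
def vTable : List (String × (String → String → Bool)) :=
  [("length", fun i _ => PySem.Str.len i == 3),
   ("invalidInt", fun i _ =>
      match PySem.Int.ofStr? (PySem.Str.slice i (some (PySem.Str.find i "|" + 1)) none) with
      | some n => (PySem.List.pyRange 1 9 1).contains n
      | none => false),
   ("invalidLetter", fun i _ =>
      ["a", "b", "c", "d", "e", "f", "g", "h"].contains
        (PySem.Str.slice i none (some (PySem.Str.find i "|")))),
   ("pieceColor", fun _ j => ["b", "w"].contains (PySem.Str.slice j none (some 1))),
   ("pieceName", fun _ j =>
      ["pawn", "knight", "bishop", "rook", "queen", "king"].contains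
        (PySem.Str.slice j (some 1) none))]

def validateErrorList_alt (errorList : List (String × List (String × String))) :
    List (String × List (String × String)) :=
  -- pred = next((p for name, p in table if name == error), lambda i, j: False)
  -- errorList[error] = {i: j for i, j in pairs.items() if not pred(i, j)}
  errorList.map (fun ep =>
    let pred := (vTable.lookup ep.1).getD (fun _ _ => false)
    (ep.1, ep.2.filter (fun ij => !pred ij.1 ij.2)))

-- ===== PRECONDITION & SPEC =====
-- Pre_ excludes (a) assoc lists with duplicate outer or inner keys, which do not represent a
-- Python dict (the duplicate keys collapse when the input is built), and (b) inputs holding an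
-- empty piece string under the 'pieceColor' key, on which A raises IndexError (j[0]).
def Pre_validateErrorList (errorList : List (String × List (String × String))) : Prop :=
  (errorList.map Prod.fst).Nodup ∧
    ∀ ep ∈ errorList, (ep.2.map Prod.fst).Nodup ∧
      (ep.1 = "pieceColor" → ∀ ij ∈ ep.2, ij.2 ≠ "")
instance (errorList : List (String × List (String × String))) :
    Decidable (Pre_validateErrorList errorList) := by unfold Pre_validateErrorList; infer_instance

def pvWitness_validateErrorList : (List (String × List (String × String))) :=
  [("length", [("a|1", "bking"), ("ab", "x")]),
   ("invalidInt", [("a|7", "y"), ("b|9", "z")]),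
   ("pieceColor", [("c|2", "wpawn"), ("d|3", "xrook")])]

def Spec_validateErrorList (errorList : List (String × List (String × String)))
    (out : List (String × List (String × String))) : Prop := out = validateErrorList_alt errorList
instance (errorList : List (String × List (String × String)))
    (out : List (String × List (String × String))) : Decidable (Spec_validateErrorList errorList out) := by
  unfold Spec_validateErrorList; infer_instance

-- ===== CLAIM (what is proved, stated in full; the proofs are below) =====
def Claim_equal_validateErrorList : Prop :=
  ∀ (errorList : List (String × List (String × String))), Dom_validateErrorList errorList →
    Pre_validateErrorList errorList →
      Spec_validateErrorList errorList (validateErrorList errorList)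

-- ===== LEMMAS AND PROOFS =====

-- A's pieceColor condition (j[0] as a Char) equals B's (j[:1] as a String), including empty j.
lemma pieceColor_cond (j : String) (st : PySem.Dict String String) (i : String) :
    (match PySem.Str.pyGet? j 0 with
     | some c => if (['b','w'] : List Char).contains c then st.erase i else st
     | none => st) =
    if (["b","w"] : List String).contains (PySem.Str.slice j none (some 1)) then st.erase i else st := by
  have hs : ∀ u : String, (PySem.Str.slice j none (some 1) = u) ↔ (PySem.Chars.slice j.toList none (some 1) = u.toList) := by
    intro u; rw [← String.toList_inj, PySem.Str.toList_slice]
  cases h : j.toList with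
  | nil =>
      simp only [PySem.Str.pyGet?_eq, h, PySem.Chars.pyGet?_eq_listPyGet?,
        List.contains_eq_mem, List.mem_cons, List.not_mem_nil, or_false]
      simp [PySem.List.pyGet?, hs, h, PySem.Chars.slice_eq_listSlice, PySem.List.slice]
  | cons c t =>
      simp only [PySem.Str.pyGet?_eq, h, PySem.Chars.pyGet?_eq_listPyGet?]
      have h0 : PySem.List.pyGet? (c :: t) (0 : Int) = some c := by
        simp [PySem.List.pyGet?, PySem.List.pyIdx?]
      rw [h0]
      simp only [List.contains_eq_mem, List.mem_cons, List.not_mem_nil, or_false,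
        decide_eq_true_eq, hs, h, PySem.Chars.slice_eq_listSlice]
      have hsl : PySem.List.slice (c :: t) none (some 1) = [c] := by
        simp [PySem.List.slice]
      rw [hsl]
      rcases Decidable.em (c = 'b') with hb | hb
      · simp [hb]
      · rcases Decidable.em (c = 'w') with hw | hw
        · simp [hw]
        · simp [hb, hw]

-- A's invalidInt branch: the match-with-erase equals erase-iff-the-match-predicate.
lemma invalidInt_cond (i : String) (st : PySem.Dict String String) :
    (match PySem.Int.ofStr? (PySem.Str.slice i (some (PySem.Str.find i "|" + 1)) none) with
     | some n => if (PySem.List.pyRange 1 9 1).contains n then st.erase i else st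
     | none => st) =
    (if (match PySem.Int.ofStr? (PySem.Str.slice i (some (PySem.Str.find i "|" + 1)) none) with
         | some n => (PySem.List.pyRange 1 9 1).contains n
         | none => false) = true then st.erase i else st) := by
  cases PySem.Int.ofStr? (PySem.Str.slice i (some (PySem.Str.find i "|" + 1)) none) <;> simp

-- A's inner-loop step, expressed as "erase iff B's table predicate holds".
lemma vStep_eq (e : String) (st : PySem.Dict String String) (ij : String × String) :
    vStep e st ij =
      if ((vTable.lookup e).getD (fun _ _ => false)) ij.1 ij.2 then st.erase ij.1 else st := by
  rcases ij with ⟨i, j⟩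
  by_cases h1 : e = "length"
  · subst h1; simp [vStep, vTable, List.lookup]
  · by_cases h2 : e = "invalidInt"
    · subst h2
      unfold vStep
      dsimp only
      rw [show (("invalidInt" : String) == "length") = false from by decide,
          show (("invalidInt" : String) == "invalidInt") = true from by decide]
      rw [if_neg Bool.false_ne_true, if_pos rfl]
      have hl : ∀ i j : String, ((vTable.lookup "invalidInt").getD (fun _ _ => false)) i j =
          match PySem.Int.ofStr? (PySem.Str.slice i (some (PySem.Str.find i "|" + 1)) none) with
          | some n => (PySem.List.pyRange 1 9 1).contains n
          | none => false := by
        intro i j; simp [vTable, List.lookup]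
      rw [hl]
      exact invalidInt_cond i st
    · by_cases h3 : e = "invalidLetter"
      · subst h3; simp [vStep, vTable, List.lookup]
      · by_cases h4 : e = "pieceColor"
        · subst h4
          unfold vStep
          rw [show (("pieceColor" : String) == "length") = false from by decide,
              show (("pieceColor" : String) == "invalidInt") = false from by decide,
              show (("pieceColor" : String) == "invalidLetter") = false from by decide,
              show (("pieceColor" : String) == "pieceColor") = true from by decide]
          rw [if_neg Bool.false_ne_true, if_neg Bool.false_ne_true, if_neg Bool.false_ne_true,
              if_pos rfl]
          have hl : (vTable.lookup "pieceColor").getD (fun _ _ => false) =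
              fun _ j => (["b", "w"] : List String).contains (PySem.Str.slice j none (some 1)) := by
            simp [vTable, List.lookup]
          rw [hl]
          exact pieceColor_cond j st i
        · by_cases h5 : e = "pieceName"
          · subst h5; simp [vStep, vTable, List.lookup]
          · have hb1 : (e == "length") = false := beq_eq_false_iff_ne.mpr h1
            have hb2 : (e == "invalidInt") = false := beq_eq_false_iff_ne.mpr h2
            have hb3 : (e == "invalidLetter") = false := beq_eq_false_iff_ne.mpr h3
            have hb4 : (e == "pieceColor") = false := beq_eq_false_iff_ne.mpr h4
            have hb5 : (e == "pieceName") = false := beq_eq_false_iff_ne.mpr h5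
            have hl : vTable.lookup e = none := by
              simp [vTable, List.lookup, hb1, hb2, hb3, hb4, hb5]
            simp [vStep, hb1, hb2, hb3, hb4, hb5, hl]

-- Dict.erase is a filter of the items: the whole fold moves to the items list.
lemma items_foldl_erase (F : String × String → Bool) :
    ∀ (l : List (String × String)) (st : PySem.Dict String String),
      (l.foldl (fun st ij => if F ij then st.erase ij.1 else st) st).items =
        l.foldl (fun s ij => if F ij then s.filter (fun p => !(p.1 == ij.1)) else s) st.items := by
  intro l
  induction l with
  | nil => intro st; rfl
  | cons a t ih =>
      intro st
      simp only [List.foldl_cons]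
      rw [ih]
      cases hF : F a <;> simp [hF, PySem.Dict.erase]

lemma foldl_pop_cons (F : String × String → Bool) (i : String) (j : String) :
    ∀ (t : List (String × String)) (st : List (String × String)),
      (∀ x ∈ t, x.1 ≠ i) →
      t.foldl (fun s ij => if F ij then s.filter (fun p => !(p.1 == ij.1)) else s) ((i, j) :: st) =
        (i, j) :: t.foldl (fun s ij => if F ij then s.filter (fun p => !(p.1 == ij.1)) else s) st := by
  intro t
  induction t with
  | nil => intro st _; rfl
  | cons a r ih =>
      intro st hne
      simp only [List.foldl_cons]
      cases hF : F a with
      | false =>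
          simp only [hF, if_false, Bool.false_eq_true]
          exact ih st (fun x hx => hne x (List.mem_cons_of_mem a hx))
      | true =>
          simp only [hF, if_true]
          have hi : (!(i == a.1)) = true := by
            simp [beq_iff_eq]
            intro hh
            exact hne a (List.mem_cons_self) hh.symm
          rw [show (List.filter (fun p => !p.1 == a.1) ((i, j) :: st)) = (i, j) :: List.filter (fun p => !p.1 == a.1) st from List.filter_cons_of_pos hi]
          exact ih _ (fun x hx => hne x (List.mem_cons_of_mem a hx))

lemma foldl_pop_eq_filter (F : String × String → Bool) :
    ∀ (l : List (String × String)), (l.map Prod.fst).Nodup →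
      l.foldl (fun s ij => if F ij then s.filter (fun p => !(p.1 == ij.1)) else s) l =
        l.filter (fun ij => !F ij) := by
  intro l
  induction l with
  | nil => intro _; rfl
  | cons a t ih =>
      intro hnd
      rcases a with ⟨i, j⟩
      simp only [List.map_cons, List.nodup_cons] at hnd
      have hni : ∀ x ∈ t, x.1 ≠ i := by
        intro x hx hxi
        exact hnd.1 (by exact List.mem_map.mpr ⟨x, hx, hxi⟩)
      simp only [List.foldl_cons]
      cases hF : F (i, j) with
      | true =>
          simp only [hF, if_true]
          have h1 : (!(i == i)) = false := by simp
          rw [List.filter_cons_of_neg (by simp [h1])]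
          have h2 : t.filter (fun p => !(p.1 == i)) = t := by
            apply List.filter_eq_self.mpr
            intro x hx; simp [beq_iff_eq]; exact hni x hx
          rw [h2, ih hnd.2]
          rw [List.filter_cons_of_neg (by simp [hF])]
      | false =>
          simp only [hF, if_false, Bool.false_eq_true]
          rw [foldl_pop_cons F i j t t hni, ih hnd.2]
          rw [List.filter_cons_of_pos (by simp [hF])]

-- ===== VERDICT (by name: the statement is the Claim_ definition above) =====
theorem validateErrorList_spec : Claim_equal_validateErrorList := by
  intro errorList _hdom hpre
  unfold Spec_validateErrorList validateErrorList validateErrorList_alt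
  apply List.map_congr_left
  intro ep hep
  have hnd : (ep.2.map Prod.fst).Nodup := (hpre.2 ep hep).1
  set P : String × String → Bool :=
    fun ij => ((vTable.lookup ep.1).getD (fun _ _ => false)) ij.1 ij.2 with hP
  have hfun : vStep ep.1 = fun st ij => if P ij then st.erase ij.1 else st :=
    funext fun st => funext fun ij => vStep_eq ep.1 st ij
  rw [hfun, items_foldl_erase P ep.2 (PySem.Dict.mk ep.2)]
  exact congrArg _ (foldl_pop_eq_filter P ep.2 hnd)
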